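-- pv_equiv track=rewrite | github.com/hollenstein/xlsxreport | xlsxreport/template/sections.py | _switch_key_positions
-- ===== SOURCE A (Python) =====
-- from typing import Any
--
-- def _switch_key_positions(
--     _dict: dict[str, Any], key1: str, key2: str
-- ) -> dict[str, Any]:
--     """Move key1 in front of key2 in the dictionary."""
--     if key1 not in _dict:
--         raise ValueError(f"Invalid key '{key1}'")
--     if key2 not in _dict:
--         raise ValueError(f"Invalid key '{key2}'")
--     if key1 == key2:
--         return _dict
--     key_order = [k for k in _dict if k != key1]
--     index = list(key_order).index(key2)
--     key_order.insert(index, key1)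
--     return {k: _dict[k] for k in key_order}
-- ===== SOURCE B (Python) =====
-- def _switch_key_positions(_dict, key1, key2):
--     """Move key1 in front of key2 in the dictionary."""
--     if key1 not in _dict:
--         raise ValueError(f"Invalid key '{key1}'")
--     if key2 not in _dict:
--         raise ValueError(f"Invalid key '{key2}'")
--     if key1 == key2:
--         return _dict
--     result = {}
--     for k, v in _dict.items():
--         if k == key1:
--             continue
--         if k == key2:
--             result[key1] = _dict[key1]
--             result[k] = v
--         else:
--             result[k] = v
--     return result
-- ===== Notes on version B (the rewrite author's own statement) =====
-- stated objective: simpler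
-- what changed: Replaced the key-list/filter/.index/.insert/dict-comprehension pipeline by a single pass over the items that skips key1 and emits it just before key2; Pre_ excludes inputs where A raises ValueError (key1 or key2 missing) and association lists with duplicate keys, which do not represent a Python dict.
import Mathlib
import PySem

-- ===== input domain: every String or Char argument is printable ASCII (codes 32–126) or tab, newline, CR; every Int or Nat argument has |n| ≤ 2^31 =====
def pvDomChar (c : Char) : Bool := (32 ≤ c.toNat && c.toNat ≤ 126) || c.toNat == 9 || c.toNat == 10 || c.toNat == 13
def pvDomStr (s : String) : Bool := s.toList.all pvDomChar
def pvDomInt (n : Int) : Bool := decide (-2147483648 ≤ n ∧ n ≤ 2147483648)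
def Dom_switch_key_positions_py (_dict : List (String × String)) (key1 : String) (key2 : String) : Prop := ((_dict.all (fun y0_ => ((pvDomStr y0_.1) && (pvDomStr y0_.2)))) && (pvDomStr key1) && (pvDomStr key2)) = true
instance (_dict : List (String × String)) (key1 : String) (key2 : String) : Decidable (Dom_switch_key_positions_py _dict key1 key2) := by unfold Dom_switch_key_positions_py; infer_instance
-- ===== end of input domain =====

-- B replaces A's key-list/filter/.index/.insert/dict-comprehension pipeline by one pass over the
-- items that skips key1 and re-emits it just before key2 (objective: simpler).

-- ===== PORT A =====
-- first-match association-list lookup = _dict[k] (exact for a dict; the "" default is dead code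
-- under Pre_, where every looked-up key is present)
def pvLookup (_dict : List (String × String)) (k : String) : String :=
  match _dict with
  | [] => ""
  | (k', v) :: rest => if k' = k then v else pvLookup rest k

def switch_key_positions_py (_dict : List (String × String)) (key1 : String) (key2 : String) : List (String × String) :=
  if key1 ∉ _dict.map Prod.fst then []         -- raise ValueError (excluded by Pre_)
  else if key2 ∉ _dict.map Prod.fst then []    -- raise ValueError (excluded by Pre_)
  else if key1 = key2 then _dict
  else
    let key_order := (_dict.map Prod.fst).filter (fun k => k ≠ key1)
    match PySem.List.index? key_order key2 with
    | none => []                               -- unreachable: .index would raise (excluded by Pre_)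
    | some index =>
      let key_order := PySem.List.insert key_order (index : Int) key1
      key_order.map (fun k => (k, pvLookup _dict k))

-- ===== PORT B =====
def altGo (v1 key1 key2 : String) : List (String × String) → List (String × String)
  | [] => []
  | (k, v) :: rest =>
    if k = key1 then altGo v1 key1 key2 rest
    else if k = key2 then (key1, v1) :: (k, v) :: altGo v1 key1 key2 rest
    else (k, v) :: altGo v1 key1 key2 rest

def switch_key_positions_py_alt (_dict : List (String × String)) (key1 : String) (key2 : String) : List (String × String) :=
  if key1 ∉ _dict.map Prod.fst then []
  else if key2 ∉ _dict.map Prod.fst then []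
  else if key1 = key2 then _dict
  else altGo (pvLookup _dict key1) key1 key2 _dict

-- ===== PRECONDITION & SPEC =====
-- Pre_ excludes inputs where A raises ValueError (key1 or key2 not a key) and association lists
-- with duplicate keys, which do not represent any Python dict input of A.
def Pre_switch_key_positions_py (_dict : List (String × String)) (key1 : String) (key2 : String) : Prop :=
  (_dict.map Prod.fst).Nodup ∧ key1 ∈ _dict.map Prod.fst ∧ key2 ∈ _dict.map Prod.fst
instance (_dict : List (String × String)) (key1 : String) (key2 : String) : Decidable (Pre_switch_key_positions_py _dict key1 key2) := by unfold Pre_switch_key_positions_py; infer_instance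

def pvWitness_switch_key_positions_py : (List (String × String)) × String × String :=
  ([("a", "1"), ("b", "2"), ("c", "3")], "c", "a")

def Spec_switch_key_positions_py (_dict : List (String × String)) (key1 : String) (key2 : String) (out : List (String × String)) : Prop := out = switch_key_positions_py_alt _dict key1 key2
instance (_dict : List (String × String)) (key1 : String) (key2 : String) (out : List (String × String)) : Decidable (Spec_switch_key_positions_py _dict key1 key2 out) := by unfold Spec_switch_key_positions_py; infer_instance

-- ===== CLAIM (what is proved, stated in full; the proofs are below) =====
def Claim_equal_switch_key_positions_py : Prop := ∀ (_dict : List (String × String)) (key1 : String) (key2 : String), Dom_switch_key_positions_py _dict key1 key2 → Pre_switch_key_positions_py _dict key1 key2 → Spec_switch_key_positions_py _dict key1 key2 (switch_key_positions_py _dict key1 key2)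

-- ===== LEMMAS AND PROOFS =====

-- when key2 does not occur, B's pass just copies the non-key1 entries, which is A's filtered map
theorem altGo_no_key2 (v1 key1 key2 : String) (L D : List (String × String))
    (h2 : key2 ∉ L.map Prod.fst)
    (hD : ∀ k v, (k, v) ∈ L → pvLookup D k = v) :
    ((L.map Prod.fst).filter (fun k => k ≠ key1)).map (fun k => (k, pvLookup D k))
      = altGo v1 key1 key2 L := by
  induction L with
  | nil => rfl
  | cons p rest ih =>
    obtain ⟨k, v⟩ := p
    simp only [List.map_cons, List.mem_cons, not_or] at h2
    have hk2 : ¬ k = key2 := fun h => h2.1 h.symm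
    have hDr : ∀ k v, (k, v) ∈ rest → pvLookup D k = v := fun k v h => hD k v (List.mem_cons_of_mem _ h)
    by_cases h1 : k = key1
    · rw [List.map_cons, List.filter_cons, if_neg (by simp [h1])]
      simp only [altGo, if_pos h1]
      exact ih h2.2 hDr
    · rw [List.map_cons, List.filter_cons, if_pos (by simp [h1]), List.map_cons]
      simp only [altGo, if_neg h1, if_neg hk2]
      rw [ih h2.2 hDr, hD k v (List.mem_cons_self ..)]

theorem main_lemma (key1 key2 v1 : String) (h12 : key1 ≠ key2) :
    ∀ (L D : List (String × String)),
    (L.map Prod.fst).Nodup →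
    key2 ∈ L.map Prod.fst →
    (∀ k v, (k, v) ∈ L → pvLookup D k = v) →
    pvLookup D key1 = v1 →
    (match PySem.List.index? ((L.map Prod.fst).filter (fun k => k ≠ key1)) key2 with
     | none => []
     | some index =>
        (PySem.List.insert ((L.map Prod.fst).filter (fun k => k ≠ key1)) (index : Int) key1).map
          (fun k => (k, pvLookup D k)))
      = altGo v1 key1 key2 L := by
  intro L
  induction L with
  | nil => intro D _ h2; simp at h2
  | cons p rest ih =>
    intro D hnd h2 hD hv1
    obtain ⟨k, v⟩ := p
    simp only [List.map_cons, List.nodup_cons] at hnd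
    have hDr : ∀ k v, (k, v) ∈ rest → pvLookup D k = v := fun k v h => hD k v (List.mem_cons_of_mem _ h)
    have hDk : pvLookup D k = v := hD k v (List.mem_cons_self ..)
    by_cases h1 : k = key1
    · -- skipped entry: key1 filtered out, B skips it too
      have h2' : key2 ∈ rest.map Prod.fst := by
        rcases List.mem_cons.1 h2 with h | h
        · exact absurd (h1 ▸ h.symm) h12
        · exact h
      rw [List.map_cons, List.filter_cons, if_neg (by simp [h1])]
      simp only [altGo, if_pos h1]
      exact ih D hnd.2 h2' hDr hv1
    · rw [List.map_cons, List.filter_cons, if_pos (by simp [h1])]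
      by_cases hk2 : k = key2
      · -- first (only) occurrence of key2: index is 0, key1 inserted in front
        have haltGo := altGo_no_key2 v1 key1 key2 rest D (hk2 ▸ hnd.1) hDr
        rw [hk2, PySem.List.index?_cons_self]
        simp only [Int.natCast_zero, PySem.List.insert_zero, List.map_cons, hv1]
        rw [← hk2, hDk]
        simp only [altGo, if_neg h1]
        rw [haltGo, if_pos trivial, hk2]
      · -- ordinary entry: index shifts by one, both sides keep (k, v) in front
        have h2' : key2 ∈ rest.map Prod.fst := by
          rcases List.mem_cons.1 h2 with h | h
          · exact absurd h.symm hk2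
          · exact h
        have hmem : key2 ∈ (rest.map Prod.fst).filter (fun x => x ≠ key1) := by
          simp only [List.mem_filter]
          exact ⟨h2', by simpa using Ne.symm h12⟩
        obtain ⟨j, hj⟩ := Option.isSome_iff_exists.1
          ((PySem.List.index?_isSome_iff _ key2).2 hmem)
        have hjlt : j < ((rest.map Prod.fst).filter (fun x => decide (x ≠ key1))).length := by
          obtain ⟨hlt, -⟩ := PySem.List.getElem_of_index?_eq_some hj
          exact hlt
        rw [show ((k, v).1 :: (rest.map Prod.fst).filter (fun x => decide (x ≠ key1))) = k :: (rest.map Prod.fst).filter (fun x => decide (x ≠ key1)) from rfl, PySem.List.index?_cons_of_ne _ hk2, hj]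
        simp only [Option.map_some]
        have hins : PySem.List.insert (k :: (rest.map Prod.fst).filter (fun x => decide (x ≠ key1)))
            ((j + 1 : Nat) : Int) key1
            = k :: PySem.List.insert ((rest.map Prod.fst).filter (fun x => decide (x ≠ key1))) (j : Int) key1 := by
          rw [PySem.List.insert_natCast _ _ _ (by simpa using Nat.le_of_lt hjlt),
              PySem.List.insert_natCast _ _ _ (Nat.le_of_lt hjlt)]
          simp [List.take_succ_cons, List.drop_succ_cons]
        have := ih D hnd.2 h2' hDr hv1
        rw [hj] at this
        rw [hins, List.map_cons, hDk]
        simp only [altGo, if_neg h1, if_neg hk2]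
        exact congrArg (List.cons (k, v)) this

theorem pvLookup_of_mem (L : List (String × String)) (k v : String)
    (hnd : (L.map Prod.fst).Nodup) (h : (k, v) ∈ L) : pvLookup L k = v := by
  induction L with
  | nil => simp at h
  | cons p rest ih =>
    obtain ⟨k', v'⟩ := p
    simp only [List.map_cons, List.nodup_cons] at hnd
    rcases List.mem_cons.1 h with h | h
    · obtain ⟨rfl, rfl⟩ := Prod.mk.injEq .. ▸ h
      simp [pvLookup]
    · have hne : k' ≠ k := by
        rintro rfl
        exact hnd.1 (List.mem_map.2 ⟨_, h, rfl⟩)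
      simp [pvLookup, hne, ih hnd.2 h]

-- ===== VERDICT (by name: the statement is the Claim_ definition above) =====
theorem switch_key_positions_py_spec : Claim_equal_switch_key_positions_py := by
  intro _dict key1 key2 _ hpre
  obtain ⟨hnd, h1, h2⟩ := hpre
  unfold Spec_switch_key_positions_py switch_key_positions_py switch_key_positions_py_alt
  by_cases h12 : key1 = key2
  · simp [h2, h12]
  · simp only [h1, h2, h12, not_true_eq_false, if_false]
    exact main_lemma key1 key2 (pvLookup _dict key1) h12 _dict _dict hnd h2
      (fun k v h => pvLookup_of_mem _dict k v hnd h) rfl
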